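-- pv_equiv track=rewrite | github.com/andrewbaine/td-gammon | src/td_gammon/move_vectors.py | all_moves_die_start
-- ===== SOURCE A (Python) =====
-- zero_t = (0, 1, 0)
--
-- start_t = (1, 16, -1)
--
-- move_dest = (0, 16, 1)
--
-- hit_dest = (-1, 0, 2)
--
-- bar_t = (-14, 1, -1)
--
-- empty_t = (-15, 1, 0)
--
-- any_t = (-15, 16, 0)
--
-- def r():
--     return range(26)
--
-- def split_out(m):
--     ps = []
--     qs = []
--     rs = []
--     for a, b, c in m:
--         ps.append(a)
--         qs.append(b)
--         rs.append(c)
--     assert len(ps) == 26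
--     assert len(qs) == 26
--     assert len(rs) == 26
--     return ps, qs, rs
--
-- def impossible_hit(start, end):
--     return ([start, end, 1], [0 for _ in r()], [0 for _ in r()], [0 for _ in r()])
--
-- def all_moves_die_start(die, start):
--     assert 0 < die < 7
--     assert 0 < start < 26
--     end = start - die
--     move = (start, end)
--     if end < 0:
--         # over-bearoff
--         low, high, vector = split_out(
--             [empty_t if i > start else start_t if i == start else any_t for i in r()]
--         )
--         return [([start, end, 0], low, high, vector), impossible_hit(start, end)]
--     elif end == 0:
--         # exact bearoff
--         low, high, vector = split_out(
--             [empty_t if i > 6 else start_t if i == start else any_t for i in r()]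
--         )
--         return [([start, end, 0], low, high, vector), impossible_hit(start, end)]
--     else:
--         assert end > 0
--         if start == 25:
--             move = [
--                 start_t if i == start else move_dest if i == end else any_t for i in r()
--             ]
--             hit = [
--                 (
--                     start_t
--                     if i == start
--                     else hit_dest if i == end else bar_t if i == 0 else any_t
--                 )
--                 for i in r()
--             ]
--             a, b, c = split_out(move)
--             d, e, f = split_out(hit)
--             return [
--                 ([start, end, 0], a, b, c),
--                 ([start, end, 1], d, e, f),
--             ]
--         assert start != 25
--         move = [
--             (
--                 zero_t
--                 if i == 25
--                 else (start_t if i == start else move_dest if i == end else any_t)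
--             )
--             for i in r()
--         ]
--         hit = [
--             (
--                 zero_t
--                 if i == 25
--                 else (
--                     start_t
--                     if i == start
--                     else hit_dest if i == end else bar_t if i == 0 else any_t
--                 )
--             )
--             for i in r()
--         ]
--         a, b, c = split_out(move)
--         s, t, u = split_out(hit)
--         return [([start, end, 0], a, b, c), ([start, end, 1], s, t, u)]
-- ===== SOURCE B (Python) =====
-- zero_t = (0, 1, 0)
-- start_t = (1, 16, -1)
-- move_dest = (0, 16, 1)
-- hit_dest = (-1, 0, 2)
-- bar_t = (-14, 1, -1)
-- empty_t = (-15, 1, 0)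
-- any_t = (-15, 16, 0)
--
-- def _expand(runs):
--     # expand a run-length description [(count, triple), ...] into the three component lists
--     lo, hi, v = [], [], []
--     for n, (a, b, c) in runs:
--         lo += [a] * n
--         hi += [b] * n
--         v += [c] * n
--     return lo, hi, v
--
-- def all_moves_die_start(die, start):
--     assert 0 < die < 7
--     assert 0 < start < 26
--     end = start - die
--     if end < 0:
--         # over-bearoff: any_t below start, start_t at start, empty_t above
--         lo, hi, v = _expand([(start, any_t), (1, start_t), (25 - start, empty_t)])
--         z = [0] * 26
--         return [([start, end, 0], lo, hi, v), ([start, end, 1], z, [0] * 26, [0] * 26)]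
--     if end == 0:
--         # exact bearoff: start <= 6 here; empty_t above index 6
--         lo, hi, v = _expand([(start, any_t), (1, start_t), (6 - start, any_t), (19, empty_t)])
--         z = [0] * 26
--         return [([start, end, 0], lo, hi, v), ([start, end, 1], z, [0] * 26, [0] * 26)]
--     # ordinary move: 0 < end < start <= 25
--     tail = [] if start == 25 else [(24 - start, any_t), (1, zero_t)]
--     move = _expand([(end, any_t), (1, move_dest), (start - end - 1, any_t), (1, start_t)] + tail)
--     hit = _expand([(1, bar_t), (end - 1, any_t), (1, hit_dest), (start - end - 1, any_t), (1, start_t)] + tail)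
--     return [([start, end, 0], move[0], move[1], move[2]),
--             ([start, end, 1], hit[0], hit[1], hit[2])]
-- ===== Notes on version B (the rewrite author's own statement) =====
-- stated objective: alternative
-- what changed: B describes each vector as a short run-length list of (count, triple) segments computed from start/end and expands it once, instead of A's per-index branching comprehension over range(26) followed by a split_out transpose.
import Mathlib
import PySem

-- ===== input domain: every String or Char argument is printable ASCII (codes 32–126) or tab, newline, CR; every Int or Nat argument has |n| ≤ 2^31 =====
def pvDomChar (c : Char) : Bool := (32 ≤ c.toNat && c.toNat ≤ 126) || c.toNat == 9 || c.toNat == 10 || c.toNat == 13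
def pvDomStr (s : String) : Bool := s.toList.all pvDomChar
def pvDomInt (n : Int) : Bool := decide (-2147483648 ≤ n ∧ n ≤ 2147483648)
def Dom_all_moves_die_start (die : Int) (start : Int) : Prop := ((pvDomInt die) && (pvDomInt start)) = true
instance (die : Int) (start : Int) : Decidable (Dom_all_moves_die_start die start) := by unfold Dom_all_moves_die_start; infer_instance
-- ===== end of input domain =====

-- B builds each vector from a short run-length list of segments expanded once, instead of
-- A's per-index branching comprehension over range(26) plus a split_out transpose.

-- ===== PORT A =====
def zero_t : Int × Int × Int := (0, 1, 0)
def start_t : Int × Int × Int := (1, 16, -1)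
def move_dest : Int × Int × Int := (0, 16, 1)
def hit_dest : Int × Int × Int := (-1, 0, 2)
def bar_t : Int × Int × Int := (-14, 1, -1)
def empty_t : Int × Int × Int := (-15, 1, 0)
def any_t : Int × Int × Int := (-15, 16, 0)

def pyR : List Int := PySem.List.pyRange 0 26 1

def split_out (m : List (Int × Int × Int)) : List Int × List Int × List Int :=
  m.foldl (fun acc t => (acc.1 ++ [t.1], acc.2.1 ++ [t.2.1], acc.2.2 ++ [t.2.2])) ([], [], [])

def impossible_hit (start e : Int) : List Int × List Int × List Int × List Int :=
  ([start, e, 1], pyR.map (fun _ => 0), pyR.map (fun _ => 0), pyR.map (fun _ => 0))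

def all_moves_die_start (die : Int) (start : Int) : List (List Int × List Int × List Int × List Int) :=
  let e := start - die
  if e < 0 then
    let s := split_out (pyR.map (fun i => if i > start then empty_t else if i = start then start_t else any_t))
    [([start, e, 0], s.1, s.2.1, s.2.2), impossible_hit start e]
  else if e = 0 then
    let s := split_out (pyR.map (fun i => if i > 6 then empty_t else if i = start then start_t else any_t))
    [([start, e, 0], s.1, s.2.1, s.2.2), impossible_hit start e]
  else if start = 25 then
    let mv := split_out (pyR.map (fun i => if i = start then start_t else if i = e then move_dest else any_t))
    let ht := split_out (pyR.map (fun i => if i = start then start_t else if i = e then hit_dest else if i = 0 then bar_t else any_t))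
    [([start, e, 0], mv.1, mv.2.1, mv.2.2), ([start, e, 1], ht.1, ht.2.1, ht.2.2)]
  else
    let mv := split_out (pyR.map (fun i => if i = 25 then zero_t else if i = start then start_t else if i = e then move_dest else any_t))
    let ht := split_out (pyR.map (fun i => if i = 25 then zero_t else if i = start then start_t else if i = e then hit_dest else if i = 0 then bar_t else any_t))
    [([start, e, 0], mv.1, mv.2.1, mv.2.2), ([start, e, 1], ht.1, ht.2.1, ht.2.2)]

-- ===== PORT B =====
-- expand a run-length description [(count, triple), …] into the three component lists
def expandRuns (runs : List (Int × (Int × Int × Int))) : List Int × List Int × List Int :=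
  runs.foldl
    (fun acc nt =>
      (acc.1 ++ List.replicate nt.1.toNat nt.2.1,
       acc.2.1 ++ List.replicate nt.1.toNat nt.2.2.1,
       acc.2.2 ++ List.replicate nt.1.toNat nt.2.2.2))
    ([], [], [])

def all_moves_die_start_alt (die : Int) (start : Int) : List (List Int × List Int × List Int × List Int) :=
  let e := start - die
  if e < 0 then
    let s := expandRuns [(start, any_t), (1, start_t), (25 - start, empty_t)]
    let z := List.replicate 26 (0 : Int)
    [([start, e, 0], s.1, s.2.1, s.2.2), ([start, e, 1], z, List.replicate 26 (0 : Int), List.replicate 26 (0 : Int))]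
  else if e = 0 then
    let s := expandRuns [(start, any_t), (1, start_t), (6 - start, any_t), (19, empty_t)]
    let z := List.replicate 26 (0 : Int)
    [([start, e, 0], s.1, s.2.1, s.2.2), ([start, e, 1], z, List.replicate 26 (0 : Int), List.replicate 26 (0 : Int))]
  else
    let tail : List (Int × (Int × Int × Int)) :=
      if start = 25 then [] else [(24 - start, any_t), (1, zero_t)]
    let mv := expandRuns ([(e, any_t), (1, move_dest), (start - e - 1, any_t), (1, start_t)] ++ tail)
    let ht := expandRuns ([(1, bar_t), (e - 1, any_t), (1, hit_dest), (start - e - 1, any_t), (1, start_t)] ++ tail)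
    [([start, e, 0], mv.1, mv.2.1, mv.2.2), ([start, e, 1], ht.1, ht.2.1, ht.2.2)]

-- ===== PRECONDITION & SPEC =====
-- A asserts 0 < die < 7 and 0 < start < 26 and raises AssertionError otherwise.
def Pre_all_moves_die_start (die : Int) (start : Int) : Prop :=
  0 < die ∧ die < 7 ∧ 0 < start ∧ start < 26
instance (die : Int) (start : Int) : Decidable (Pre_all_moves_die_start die start) := by
  unfold Pre_all_moves_die_start; infer_instance
def pvWitness_all_moves_die_start : Int × Int := (3, 5)
def Spec_all_moves_die_start (die : Int) (start : Int) (out : List (List Int × List Int × List Int × List Int)) : Prop := out = all_moves_die_start_alt die start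
instance (die : Int) (start : Int) (out : List (List Int × List Int × List Int × List Int)) : Decidable (Spec_all_moves_die_start die start out) := by unfold Spec_all_moves_die_start; infer_instance

-- ===== CLAIM =====
def Claim_equal_all_moves_die_start : Prop := ∀ (die : Int) (start : Int), Dom_all_moves_die_start die start → Pre_all_moves_die_start die start → Spec_all_moves_die_start die start (all_moves_die_start die start)

-- ===== LEMMAS AND PROOFS =====

-- split_out is the three projections
theorem split_out_foldl_acc (l : List (Int × Int × Int)) :
    ∀ acc : List Int × List Int × List Int,
      l.foldl (fun acc t => (acc.1 ++ [t.1], acc.2.1 ++ [t.2.1], acc.2.2 ++ [t.2.2])) acc =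
        (acc.1 ++ l.map (·.1), acc.2.1 ++ l.map (·.2.1), acc.2.2 ++ l.map (·.2.2)) := by
  induction l with
  | nil => intro acc; simp
  | cons h t ih => intro acc; simp [List.foldl_cons, ih]

theorem split_out_eq (l : List (Int × Int × Int)) :
    split_out l = (l.map (·.1), l.map (·.2.1), l.map (·.2.2)) := by
  simpa [split_out] using split_out_foldl_acc l ([], [], [])

-- expandRuns is the three projections of the flattened run list
def runsL (runs : List (Int × (Int × Int × Int))) : List (Int × Int × Int) :=
  runs.flatMap (fun r => List.replicate r.1.toNat r.2)

theorem expandRuns_foldl_acc (runs : List (Int × (Int × Int × Int))) :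
    ∀ acc : List Int × List Int × List Int,
      runs.foldl
        (fun acc nt =>
          (acc.1 ++ List.replicate nt.1.toNat nt.2.1,
           acc.2.1 ++ List.replicate nt.1.toNat nt.2.2.1,
           acc.2.2 ++ List.replicate nt.1.toNat nt.2.2.2)) acc =
        (acc.1 ++ (runsL runs).map (·.1), acc.2.1 ++ (runsL runs).map (·.2.1),
         acc.2.2 ++ (runsL runs).map (·.2.2)) := by
  induction runs with
  | nil => intro acc; simp [runsL]
  | cons r rs ih => intro acc; simp [List.foldl_cons, ih, runsL, List.flatMap_cons]

theorem expandRuns_eq (runs : List (Int × (Int × Int × Int))) :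
    expandRuns runs = ((runsL runs).map (·.1), (runsL runs).map (·.2.1), (runsL runs).map (·.2.2)) := by
  simpa [expandRuns] using expandRuns_foldl_acc runs ([], [], [])

-- pyR as a Nat range
theorem pyR_map {α : Type} (f : Int → α) :
    pyR.map f = (List.range 26).map (fun k : Nat => f (k : Int)) := by
  apply List.ext_getElem
  · simp [pyR, PySem.List.length_pyRange_one]
  · intro i h1 h2
    simp [pyR, PySem.List.getElem_pyRange_one]

-- range segmentation machinery
def flatRuns {α : Type} (runs : List (Nat × α)) : List α :=
  runs.flatMap (fun r => List.replicate r.1 r.2)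

def totalRuns {α : Type} (runs : List (Nat × α)) : Nat := (runs.map (·.1)).sum

theorem range_map_split {α : Type} (m n : Nat) (g : Nat → α) :
    (List.range (m + n)).map g = (List.range m).map g ++ (List.range n).map (fun k => g (m + k)) := by
  rw [List.range_add]
  simp [List.map_map, Function.comp_def]

theorem range_map_const {α : Type} (n : Nat) (g : Nat → α) (c : α) (h : ∀ k, k < n → g k = c) :
    (List.range n).map g = List.replicate n c := by
  rw [List.eq_replicate_iff]
  refine ⟨by simp, ?_⟩
  intro b hb
  rcases List.mem_map.mp hb with ⟨k, hk, rfl⟩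
  exact h k (List.mem_range.mp hk)

theorem flat_nil {α : Type} (g : Nat → α) : (List.range (totalRuns ([] : List (Nat × α)))).map g = flatRuns ([] : List (Nat × α)) := by
  simp [totalRuns, flatRuns]

theorem flat_cons {α : Type} (n : Nat) (c : α) (rs : List (Nat × α)) (g : Nat → α)
    (h1 : ∀ k, k < n → g k = c)
    (h2 : (List.range (totalRuns rs)).map (fun k => g (n + k)) = flatRuns rs) :
    (List.range (totalRuns ((n, c) :: rs))).map g = flatRuns ((n, c) :: rs) := by
  have ht : totalRuns ((n, c) :: rs) = n + totalRuns rs := by simp [totalRuns]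
  rw [ht, range_map_split, range_map_const n g c h1, h2]
  simp [flatRuns, List.flatMap_cons]

theorem entry_eq (X : List (Int × Int × Int)) (R : List (Int × (Int × Int × Int)))
    (h : X = runsL R) : split_out X = expandRuns R := by
  rw [split_out_eq, expandRuns_eq, h]

theorem zeros_eq : pyR.map (fun _ : Int => (0 : Int)) = List.replicate 26 (0 : Int) := by
  rw [pyR_map]
  exact range_map_const _ _ _ (fun k _ => rfl)

-- ===== VERDICT =====
theorem all_moves_die_start_spec : Claim_equal_all_moves_die_start := by
  intro die start _ hpre
  obtain ⟨hd1, hd2, hs1, hs2⟩ := hpre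
  obtain ⟨d, rfl⟩ : ∃ d : Nat, die = (d : Int) := ⟨die.toNat, by omega⟩
  obtain ⟨s, rfl⟩ : ∃ s : Nat, start = (s : Int) := ⟨start.toNat, by omega⟩
  unfold Spec_all_moves_die_start
  simp only [all_moves_die_start, all_moves_die_start_alt, impossible_hit]
  split_ifs with hlt heq h25
  · -- over-bearoff: e < 0
    have hA : pyR.map (fun i => if i > (s : Int) then empty_t else if i = (s : Int) then start_t else any_t)
        = runsL [((s : Int), any_t), (1, start_t), (25 - (s : Int), empty_t)] := by
      have h1 : (List.range 26).map (fun k : Nat => (fun i => if i > (s : Int) then empty_t else if i = (s : Int) then start_t else any_t) (k : Int))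
          = flatRuns [(s, any_t), (1, start_t), (25 - s, empty_t)] := by
        rw [show (26 : Nat) = totalRuns [(s, any_t), (1, start_t), (25 - s, empty_t)] from by simp [totalRuns]; omega]
        apply flat_cons
        · intro k hk; beta_reduce; split_ifs <;> first | rfl | omega
        apply flat_cons
        · intro k hk; beta_reduce; split_ifs <;> first | rfl | omega
        apply flat_cons
        · intro k hk; beta_reduce; split_ifs <;> first | rfl | omega
        exact flat_nil _
      have h2 : runsL [((s : Int), any_t), (1, start_t), (25 - (s : Int), empty_t)]
          = flatRuns [(s, any_t), (1, start_t), (25 - s, empty_t)] := by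
        simp [runsL, flatRuns, show ((25 : Int) - (s : Int)).toNat = 25 - s from by omega]
      rw [pyR_map, h1, h2]
    rw [entry_eq _ _ hA, zeros_eq]
  · -- exact bearoff: e = 0
    have hA : pyR.map (fun i => if i > (6 : Int) then empty_t else if i = (s : Int) then start_t else any_t)
        = runsL [((s : Int), any_t), (1, start_t), (6 - (s : Int), any_t), (19, empty_t)] := by
      have h1 : (List.range 26).map (fun k : Nat => (fun i => if i > (6 : Int) then empty_t else if i = (s : Int) then start_t else any_t) (k : Int))
          = flatRuns [(s, any_t), (1, start_t), (6 - s, any_t), (19, empty_t)] := by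
        rw [show (26 : Nat) = totalRuns [(s, any_t), (1, start_t), (6 - s, any_t), (19, empty_t)] from by simp [totalRuns]; omega]
        apply flat_cons
        · intro k hk; beta_reduce; split_ifs <;> first | rfl | omega
        apply flat_cons
        · intro k hk; beta_reduce; split_ifs <;> first | rfl | omega
        apply flat_cons
        · intro k hk; beta_reduce; split_ifs <;> first | rfl | omega
        apply flat_cons
        · intro k hk; beta_reduce; split_ifs <;> first | rfl | omega
        exact flat_nil _
      have h2 : runsL [((s : Int), any_t), (1, start_t), (6 - (s : Int), any_t), (19, empty_t)]
          = flatRuns [(s, any_t), (1, start_t), (6 - s, any_t), (19, empty_t)] := by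
        simp [runsL, flatRuns, show ((6 : Int) - (s : Int)).toNat = 6 - s from by omega]
      rw [pyR_map, h1, h2]
    rw [entry_eq _ _ hA, zeros_eq]
  · -- ordinary move, start = 25
    have hs25 : s = 25 := by omega
    subst hs25
    have hAm : pyR.map (fun i => if i = ((25 : Nat) : Int) then start_t else if i = ((25 : Nat) : Int) - (d : Int) then move_dest else any_t)
        = runsL ([(((25 : Nat) : Int) - (d : Int), any_t), (1, move_dest), (((25 : Nat) : Int) - (((25 : Nat) : Int) - (d : Int)) - 1, any_t), (1, start_t)] ++ []) := by
      have h1 : (List.range 26).map (fun k : Nat => (fun i => if i = ((25 : Nat) : Int) then start_t else if i = ((25 : Nat) : Int) - (d : Int) then move_dest else any_t) (k : Int))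
          = flatRuns [(25 - d, any_t), (1, move_dest), (d - 1, any_t), (1, start_t)] := by
        rw [show (26 : Nat) = totalRuns [(25 - d, any_t), (1, move_dest), (d - 1, any_t), (1, start_t)] from by simp [totalRuns]; omega]
        apply flat_cons
        · intro k hk; beta_reduce; split_ifs <;> first | rfl | omega
        apply flat_cons
        · intro k hk; beta_reduce; split_ifs <;> first | rfl | omega
        apply flat_cons
        · intro k hk; beta_reduce; split_ifs <;> first | rfl | omega
        apply flat_cons
        · intro k hk; beta_reduce; split_ifs <;> first | rfl | omega
        exact flat_nil _
      have h2 : runsL ([(((25 : Nat) : Int) - (d : Int), any_t), (1, move_dest), (((25 : Nat) : Int) - (((25 : Nat) : Int) - (d : Int)) - 1, any_t), (1, start_t)] ++ [])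
          = flatRuns [(25 - d, any_t), (1, move_dest), (d - 1, any_t), (1, start_t)] := by
        simp [runsL, flatRuns, show (((25 : Nat) : Int) - (d : Int)).toNat = 25 - d from by omega,
          show (((25 : Nat) : Int) - (((25 : Nat) : Int) - (d : Int)) - 1).toNat = d - 1 from by omega]
      rw [pyR_map, h1, h2]
    have hAh : pyR.map (fun i => if i = ((25 : Nat) : Int) then start_t else if i = ((25 : Nat) : Int) - (d : Int) then hit_dest else if i = 0 then bar_t else any_t)
        = runsL ([(1, bar_t), (((25 : Nat) : Int) - (d : Int) - 1, any_t), (1, hit_dest), (((25 : Nat) : Int) - (((25 : Nat) : Int) - (d : Int)) - 1, any_t), (1, start_t)] ++ []) := by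
      have h1 : (List.range 26).map (fun k : Nat => (fun i => if i = ((25 : Nat) : Int) then start_t else if i = ((25 : Nat) : Int) - (d : Int) then hit_dest else if i = 0 then bar_t else any_t) (k : Int))
          = flatRuns [(1, bar_t), (25 - d - 1, any_t), (1, hit_dest), (d - 1, any_t), (1, start_t)] := by
        rw [show (26 : Nat) = totalRuns [(1, bar_t), (25 - d - 1, any_t), (1, hit_dest), (d - 1, any_t), (1, start_t)] from by simp [totalRuns]; omega]
        apply flat_cons
        · intro k hk; beta_reduce; split_ifs <;> first | rfl | omega
        apply flat_cons
        · intro k hk; beta_reduce; split_ifs <;> first | rfl | omega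
        apply flat_cons
        · intro k hk; beta_reduce; split_ifs <;> first | rfl | omega
        apply flat_cons
        · intro k hk; beta_reduce; split_ifs <;> first | rfl | omega
        apply flat_cons
        · intro k hk; beta_reduce; split_ifs <;> first | rfl | omega
        exact flat_nil _
      have h2 : runsL ([(1, bar_t), (((25 : Nat) : Int) - (d : Int) - 1, any_t), (1, hit_dest), (((25 : Nat) : Int) - (((25 : Nat) : Int) - (d : Int)) - 1, any_t), (1, start_t)] ++ [])
          = flatRuns [(1, bar_t), (25 - d - 1, any_t), (1, hit_dest), (d - 1, any_t), (1, start_t)] := by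
        simp [runsL, flatRuns, show (((25 : Nat) : Int) - (d : Int) - 1).toNat = 25 - d - 1 from by omega,
          show (((25 : Nat) : Int) - (((25 : Nat) : Int) - (d : Int)) - 1).toNat = d - 1 from by omega]
      rw [pyR_map, h1, h2]
    rw [entry_eq _ _ hAm, entry_eq _ _ hAh]
  · -- ordinary move, start ≠ 25
    have hAm : pyR.map (fun i => if i = (25 : Int) then zero_t else if i = (s : Int) then start_t else if i = (s : Int) - (d : Int) then move_dest else any_t)
        = runsL ([((s : Int) - (d : Int), any_t), (1, move_dest), ((s : Int) - ((s : Int) - (d : Int)) - 1, any_t), (1, start_t)] ++ [(24 - (s : Int), any_t), (1, zero_t)]) := by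
      have h1 : (List.range 26).map (fun k : Nat => (fun i => if i = (25 : Int) then zero_t else if i = (s : Int) then start_t else if i = (s : Int) - (d : Int) then move_dest else any_t) (k : Int))
          = flatRuns [(s - d, any_t), (1, move_dest), (d - 1, any_t), (1, start_t), (24 - s, any_t), (1, zero_t)] := by
        rw [show (26 : Nat) = totalRuns [(s - d, any_t), (1, move_dest), (d - 1, any_t), (1, start_t), (24 - s, any_t), (1, zero_t)] from by simp [totalRuns]; omega]
        apply flat_cons
        · intro k hk; beta_reduce; split_ifs <;> first | rfl | omega
        apply flat_cons
        · intro k hk; beta_reduce; split_ifs <;> first | rfl | omega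
        apply flat_cons
        · intro k hk; beta_reduce; split_ifs <;> first | rfl | omega
        apply flat_cons
        · intro k hk; beta_reduce; split_ifs <;> first | rfl | omega
        apply flat_cons
        · intro k hk; beta_reduce; split_ifs <;> first | rfl | omega
        apply flat_cons
        · intro k hk; beta_reduce; split_ifs <;> first | rfl | omega
        exact flat_nil _
      have h2 : runsL ([((s : Int) - (d : Int), any_t), (1, move_dest), ((s : Int) - ((s : Int) - (d : Int)) - 1, any_t), (1, start_t)] ++ [(24 - (s : Int), any_t), (1, zero_t)])
          = flatRuns [(s - d, any_t), (1, move_dest), (d - 1, any_t), (1, start_t), (24 - s, any_t), (1, zero_t)] := by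
        simp [runsL, flatRuns, show ((s : Int) - (d : Int)).toNat = s - d from by omega,
          show ((s : Int) - ((s : Int) - (d : Int)) - 1).toNat = d - 1 from by omega,
          show ((24 : Int) - (s : Int)).toNat = 24 - s from by omega]
      rw [pyR_map, h1, h2]
    have hAh : pyR.map (fun i => if i = (25 : Int) then zero_t else if i = (s : Int) then start_t else if i = (s : Int) - (d : Int) then hit_dest else if i = 0 then bar_t else any_t)
        = runsL ([(1, bar_t), ((s : Int) - (d : Int) - 1, any_t), (1, hit_dest), ((s : Int) - ((s : Int) - (d : Int)) - 1, any_t), (1, start_t)] ++ [(24 - (s : Int), any_t), (1, zero_t)]) := by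
      have h1 : (List.range 26).map (fun k : Nat => (fun i => if i = (25 : Int) then zero_t else if i = (s : Int) then start_t else if i = (s : Int) - (d : Int) then hit_dest else if i = 0 then bar_t else any_t) (k : Int))
          = flatRuns [(1, bar_t), (s - d - 1, any_t), (1, hit_dest), (d - 1, any_t), (1, start_t), (24 - s, any_t), (1, zero_t)] := by
        rw [show (26 : Nat) = totalRuns [(1, bar_t), (s - d - 1, any_t), (1, hit_dest), (d - 1, any_t), (1, start_t), (24 - s, any_t), (1, zero_t)] from by simp [totalRuns]; omega]
        apply flat_cons
        · intro k hk; beta_reduce; split_ifs <;> first | rfl | omega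
        apply flat_cons
        · intro k hk; beta_reduce; split_ifs <;> first | rfl | omega
        apply flat_cons
        · intro k hk; beta_reduce; split_ifs <;> first | rfl | omega
        apply flat_cons
        · intro k hk; beta_reduce; split_ifs <;> first | rfl | omega
        apply flat_cons
        · intro k hk; beta_reduce; split_ifs <;> first | rfl | omega
        apply flat_cons
        · intro k hk; beta_reduce; split_ifs <;> first | rfl | omega
        apply flat_cons
        · intro k hk; beta_reduce; split_ifs <;> first | rfl | omega
        exact flat_nil _
      have h2 : runsL ([(1, bar_t), ((s : Int) - (d : Int) - 1, any_t), (1, hit_dest), ((s : Int) - ((s : Int) - (d : Int)) - 1, any_t), (1, start_t)] ++ [(24 - (s : Int), any_t), (1, zero_t)])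
          = flatRuns [(1, bar_t), (s - d - 1, any_t), (1, hit_dest), (d - 1, any_t), (1, start_t), (24 - s, any_t), (1, zero_t)] := by
        simp [runsL, flatRuns, show ((s : Int) - (d : Int) - 1).toNat = s - d - 1 from by omega,
          show ((s : Int) - ((s : Int) - (d : Int)) - 1).toNat = d - 1 from by omega,
          show ((24 : Int) - (s : Int)).toNat = 24 - s from by omega]
      rw [pyR_map, h1, h2]
    rw [entry_eq _ _ hAm, entry_eq _ _ hAh]
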